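-- pv_equiv track=rewrite | github.com/cryoem/eman2 | sphire/legacy/unused/bin/sxprocess.py | transpt
-- ===== SOURCE A (Python) =====
-- def transpt(city, n):
--     nct = len(city)
--
--     newcity=[]
--     # Segment in the range n[0]...n[1]
--     for j in range( (n[1]-n[0])%nct + 1):
--         newcity.append(city[ (j+n[0])%nct ])
--     # is followed by segment n[5]...n[2]
--     for j in range( (n[2]-n[5])%nct + 1):
--         newcity.append(city[ (j+n[5])%nct ])
--     # is followed by segment n[3]...n[4]
--     for j in range( (n[4]-n[3])%nct + 1):
--         newcity.append(city[ (j+n[3])%nct ])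
--     return newcity
-- ===== SOURCE B (Python) =====
-- def transpt(city, n):
--     nct = len(city)
--     dbl = city + city
--     newcity = []
--     for a, b in ((n[0], n[1]), (n[5], n[2]), (n[3], n[4])):
--         s = a % nct
--         L = (b - a) % nct + 1
--         newcity += dbl[s:s + L]
--     return newcity
-- ===== Notes on version B (the rewrite author's own statement) =====
-- stated objective: simpler
-- what changed: Replaces three elementwise modular-index append loops with one loop over the three (start,end) pairs that slices a doubled copy of the list, so each cyclic run is taken in a single slice.
import Mathlib
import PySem

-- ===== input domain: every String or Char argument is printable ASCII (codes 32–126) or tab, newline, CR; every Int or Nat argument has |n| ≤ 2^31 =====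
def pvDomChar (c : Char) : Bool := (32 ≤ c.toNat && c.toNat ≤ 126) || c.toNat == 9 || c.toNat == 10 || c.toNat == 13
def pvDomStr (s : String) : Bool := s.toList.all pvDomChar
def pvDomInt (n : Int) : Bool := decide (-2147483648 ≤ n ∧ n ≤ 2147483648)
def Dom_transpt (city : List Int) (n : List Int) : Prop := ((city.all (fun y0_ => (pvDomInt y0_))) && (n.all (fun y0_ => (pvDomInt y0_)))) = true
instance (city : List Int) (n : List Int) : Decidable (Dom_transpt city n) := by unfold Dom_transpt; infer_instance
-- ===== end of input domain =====

-- B replaces the three elementwise modular append loops by slicing a doubled copy of the list; objective: simpler.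
-- ===== PORT A =====
def transpt (city : List Int) (n : List Int) : List Int :=
  let nct : Int := PySem.List.len city
  let newcity : List Int := []
  let newcity := (PySem.List.pyRange 0 (PySem.Int.mod (PySem.List.pyGetD n 1 0 - PySem.List.pyGetD n 0 0) nct + 1) 1).foldl
    (fun acc j => acc ++ [PySem.List.pyGetD city (PySem.Int.mod (j + PySem.List.pyGetD n 0 0) nct) 0]) newcity
  let newcity := (PySem.List.pyRange 0 (PySem.Int.mod (PySem.List.pyGetD n 2 0 - PySem.List.pyGetD n 5 0) nct + 1) 1).foldl
    (fun acc j => acc ++ [PySem.List.pyGetD city (PySem.Int.mod (j + PySem.List.pyGetD n 5 0) nct) 0]) newcity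
  let newcity := (PySem.List.pyRange 0 (PySem.Int.mod (PySem.List.pyGetD n 4 0 - PySem.List.pyGetD n 3 0) nct + 1) 1).foldl
    (fun acc j => acc ++ [PySem.List.pyGetD city (PySem.Int.mod (j + PySem.List.pyGetD n 3 0) nct) 0]) newcity
  newcity

-- ===== PORT B =====
def transpt_alt (city : List Int) (n : List Int) : List Int :=
  let nct : Int := PySem.List.len city
  let dbl := city ++ city
  [(PySem.List.pyGetD n 0 0, PySem.List.pyGetD n 1 0),
   (PySem.List.pyGetD n 5 0, PySem.List.pyGetD n 2 0),
   (PySem.List.pyGetD n 3 0, PySem.List.pyGetD n 4 0)].foldl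
    (fun acc p =>
      let s := PySem.Int.mod p.1 nct
      let L := PySem.Int.mod (p.2 - p.1) nct + 1
      acc ++ PySem.List.slice dbl (some s) (some (s + L))) []

-- ===== PRECONDITION & SPEC =====
-- A raises ZeroDivisionError when city is empty and IndexError when n has fewer than 6 elements.
def Pre_transpt (city : List Int) (n : List Int) : Prop := city ≠ [] ∧ 6 ≤ n.length
instance (city : List Int) (n : List Int) : Decidable (Pre_transpt city n) := by unfold Pre_transpt; infer_instance
def pvWitness_transpt : List Int × List Int := ([3, 1, 4, 1, 5], [0, 2, 4, 1, 3, 3])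
def Spec_transpt (city : List Int) (n : List Int) (out : List Int) : Prop := out = transpt_alt city n
instance (city : List Int) (n : List Int) (out : List Int) : Decidable (Spec_transpt city n out) := by unfold Spec_transpt; infer_instance

-- ===== CLAIM (what is proved, stated in full; the proofs are below) =====
def Claim_equal_transpt : Prop := ∀ (city : List Int) (n : List Int), Dom_transpt city n → Pre_transpt city n → Spec_transpt city n (transpt city n)

-- ===== LEMMAS AND PROOFS =====

-- one cyclic run: A's elementwise loop equals B's slice of the doubled list
theorem seg_eq (city : List Int) (hc : city ≠ []) (a b : Int) (acc : List Int) :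
    (PySem.List.pyRange 0 (PySem.Int.mod (b - a) (PySem.List.len city) + 1) 1).foldl
      (fun acc j => acc ++ [PySem.List.pyGetD city (PySem.Int.mod (j + a) (PySem.List.len city)) 0]) acc
    = acc ++ PySem.List.slice (city ++ city) (some (PySem.Int.mod a (PySem.List.len city)))
        (some (PySem.Int.mod a (PySem.List.len city) + (PySem.Int.mod (b - a) (PySem.List.len city) + 1))) := by
  rw [PySem.List.len_eq]
  set nct : Int := (city.length : Int) with hnct
  have hn : 0 < nct := by simp [hnct]; exact List.length_pos_iff.mpr hc
  set s : Int := PySem.Int.mod a nct with hs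
  set L : Int := PySem.Int.mod (b - a) nct + 1 with hL
  have hs0 : 0 ≤ s := PySem.Int.mod_nonneg a hn
  have hsn : s < nct := PySem.Int.mod_lt a hn
  have hL1 : 1 ≤ L := by have := PySem.Int.mod_nonneg (b - a) hn; omega
  have hLn : L ≤ nct := by have := PySem.Int.mod_lt (b - a) hn; omega
  rw [PySem.List.foldl_append_singleton_eq_map, PySem.List.pyRange_one,
    PySem.List.slice_toNat _ hs0 (by omega)]
  congr 1
  rw [List.map_map]
  apply List.ext_getElem
  · simp
    omega
  · intro k h1 h2
    simp only [List.getElem_map, List.getElem_range, Function.comp_apply, List.getElem_take,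
      List.getElem_drop]
    have hkL : (k : Int) < L := by simp at h1; omega
    rw [zero_add, PySem.Int.mod_eq_emod_of_pos hn]
    have hsa : s = a % nct := PySem.Int.mod_eq_emod_of_pos hn
    have hts : ((k : Int) + a) % nct = ((k : Int) + s) % nct := by
      rw [Int.add_emod (k:Int) a, Int.add_emod (k:Int) s, hsa, Int.emod_emod_of_dvd a dvd_rfl]
    have ht0 : 0 ≤ ((k : Int) + a) % nct := Int.emod_nonneg _ (by omega)
    have htn : ((k : Int) + a) % nct < nct := Int.emod_lt_of_pos _ hn
    rw [PySem.List.pyGetD_eq_getElem city 0 ht0 (by omega)]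
    by_cases hcase : (k : Int) + s < nct
    · have ht : ((k : Int) + a) % nct = (k : Int) + s := by
        rw [hts]; exact Int.emod_eq_of_lt (by omega) hcase
      rw [List.getElem_append_left (by omega)]
      congr 1
      omega
    · have ht : ((k : Int) + a) % nct = (k : Int) + s - nct := by
        rw [hts, ← Int.sub_emod_right ((k:Int)+s) nct]
        exact Int.emod_eq_of_lt (by omega) (by omega)
      rw [List.getElem_append_right (by omega)]
      congr 1
      omega

-- ===== VERDICT (by name: the statement is the Claim_ definition above) =====
theorem transpt_spec : Claim_equal_transpt := by
  intro city n _ hpre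
  unfold Spec_transpt transpt transpt_alt
  simp only [List.foldl]
  rw [seg_eq city hpre.1, seg_eq city hpre.1, seg_eq city hpre.1]
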